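-- pv_equiv track=rewrite | github.com/ima2103/StockSim | docs/modules/calculs_logiques.py | calculer_operations
-- ===== SOURCE A (Python) =====
-- from typing import List, Any, Dict
--
-- def calculer_operations(pile_actuelle: List[Any], article_cible: Any) -> int:
--     """
--     Calcule le nombre exact d'opérations (2k + 1) nécessaires pour récupérer l'article cible.
--
--     """
--     if article_cible not in pile_actuelle:
--         return -1
--
--     # Trouver toutes les positions de l'article cible
--     indices = [i for i, x in enumerate(pile_actuelle) if x == article_cible]
--
--     # L'index du sac le plus haut de cette variété (max index)
--     id_plus_haut = max(indices)
--
--     H = len(pile_actuelle)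
--
--     # k est le nombre d'obstacles au-dessus (H - 1 - p)
--     k = (H - 1) - id_plus_haut
--
--     # Coût : 1 prise + (2 * k) mouvements
--     return 1 + (2 * k)
-- ===== SOURCE B (Python) =====
-- def calculer_operations(pile_actuelle, article_cible):
--     # Single backward pass: stop at the topmost (last) occurrence; no index list, no max().
--     k = 0
--     for x in reversed(pile_actuelle):
--         if x == article_cible:
--             return 1 + 2 * k
--         k += 1
--     return -1
-- ===== Notes on version B (the rewrite author's own statement) =====
-- stated objective: simpler
-- what changed: A does three passes (membership test, full index comprehension via enumerate, max) plus arithmetic; B is one backward scan that returns 1+2k at the first match from the top and -1 if the scan ends.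
import Mathlib
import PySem

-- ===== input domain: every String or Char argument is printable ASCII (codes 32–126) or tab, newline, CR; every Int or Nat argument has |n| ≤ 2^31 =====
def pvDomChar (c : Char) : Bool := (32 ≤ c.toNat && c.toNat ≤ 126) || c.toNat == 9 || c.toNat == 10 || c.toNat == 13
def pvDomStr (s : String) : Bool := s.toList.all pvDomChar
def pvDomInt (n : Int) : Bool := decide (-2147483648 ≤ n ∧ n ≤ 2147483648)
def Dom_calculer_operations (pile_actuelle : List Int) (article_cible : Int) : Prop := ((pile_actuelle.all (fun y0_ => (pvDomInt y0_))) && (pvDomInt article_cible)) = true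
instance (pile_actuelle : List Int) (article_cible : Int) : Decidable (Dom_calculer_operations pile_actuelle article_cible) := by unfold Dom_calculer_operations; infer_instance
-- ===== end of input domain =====

-- B replaces A's three passes (membership test, index comprehension, max) by one early-exit backward scan; objective: simpler.


-- ===== PORT A =====
def calculer_operations (pile_actuelle : List Int) (article_cible : Int) : Int :=
  if article_cible ∉ pile_actuelle then -1
  else
    let indices : List Int :=
      ((PySem.List.enumerate pile_actuelle).filter (fun p => p.2 = article_cible)).map (fun p => p.1)
    match PySem.List.max? indices id with
    | some id_plus_haut =>
        let H : Int := pile_actuelle.length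
        let k : Int := (H - 1) - id_plus_haut
        1 + 2 * k
    | none => -1  -- unreachable: membership guarantees indices is non-empty (Python max would raise)

-- ===== PORT B =====
def altGo (r : List Int) (article_cible : Int) (k : Int) : Int :=
  match r with
  | [] => -1
  | x :: xs => if x = article_cible then 1 + 2 * k else altGo xs article_cible (k + 1)

def calculer_operations_alt (pile_actuelle : List Int) (article_cible : Int) : Int :=
  altGo pile_actuelle.reverse article_cible 0

-- ===== PRECONDITION & SPEC =====
def Spec_calculer_operations (pile_actuelle : List Int) (article_cible : Int) (out : Int) : Prop := out = calculer_operations_alt pile_actuelle article_cible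
instance (pile_actuelle : List Int) (article_cible : Int) (out : Int) : Decidable (Spec_calculer_operations pile_actuelle article_cible out) := by unfold Spec_calculer_operations; infer_instance

-- ===== CLAIM (what is proved, stated in full; the proofs are below) =====
def Claim_equal_calculer_operations : Prop := ∀ (pile_actuelle : List Int) (article_cible : Int), Dom_calculer_operations pile_actuelle article_cible → Spec_calculer_operations pile_actuelle article_cible (calculer_operations pile_actuelle article_cible)

-- ===== LEMMAS AND PROOFS =====

-- max? of a snoc whose last element strictly dominates every earlier element
theorem max?_snoc_top (xs : List Int) (c : Int) (h : ∀ x ∈ xs, x < c) :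
    PySem.List.max? (xs ++ [c]) id = some c := by
  rcases hm : PySem.List.max? xs id with _ | m
  · simp only [PySem.List.max?] at hm ⊢
    rw [List.foldl_append, hm]
    rfl
  · have hmem : m ∈ xs := PySem.List.max?_mem hm
    simp only [PySem.List.max?] at hm ⊢
    rw [List.foldl_append, hm, List.foldl_cons, List.foldl_nil]
    simp [h m hmem]

-- a fold that maps some-accumulators to some-accumulators stays some
theorem foldl_stays_some {f : Option Int → Int → Option Int}
    (hf : ∀ a x, (f (some a) x).isSome) :
    ∀ (l : List Int) (a : Int), (List.foldl f (some a) l).isSome := by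
  intro l
  induction l with
  | nil => intro a; rfl
  | cons x t ih =>
      intro a
      rw [List.foldl_cons]
      obtain ⟨b, hb⟩ := Option.isSome_iff_exists.mp (hf a x)
      rw [hb]
      exact ih b

-- max? of a non-empty list is some
theorem max?_isSome (x : Int) (xs : List Int) :
    ∃ m, PySem.List.max? (x :: xs) id = some m := by
  rw [← Option.isSome_iff_exists]
  simp only [PySem.List.max?, List.foldl_cons]
  exact foldl_stays_some (fun a y => by dsimp only; split <;> rfl) xs x

-- every index produced by A's comprehension on `enumerate l s` lies in [s, s + l.length)
theorem mem_enumerate_bounds (l : List Int) (s : Int) :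
    ∀ p ∈ PySem.List.enumerate l s, s ≤ p.1 ∧ p.1 < s + l.length := by
  induction l generalizing s with
  | nil => simp [PySem.List.enumerate]
  | cons x xs ih =>
      intro p hp
      rw [PySem.List.enumerate_cons] at hp
      rcases List.mem_cons.mp hp with hp | hp
      · subst hp; simp only [List.length_cons]; constructor <;> omega
      · have := ih (s + 1) p hp
        simp at this ⊢
        omega

-- A's filtered index list is non-empty whenever the target occurs in the list
theorem filter_enumerate_ne_nil (l : List Int) (t : Int) (ht : t ∈ l) (s : Int) :
    (PySem.List.enumerate l s).filter (fun p => p.2 = t) ≠ [] := by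
  induction l generalizing s with
  | nil => simp at ht
  | cons x xs ih =>
      rw [PySem.List.enumerate_cons, List.filter_cons]
      by_cases hx : x = t
      · simp [hx]
      · have ht' : t ∈ xs := by
          rcases List.mem_cons.mp ht with h | h
          · exact absurd h.symm hx
          · exact h
        simpa [hx] using ih ht' (s + 1)

-- A's snoc recurrence
theorem A_snoc (ys : List Int) (y t : Int) :
    calculer_operations (ys ++ [y]) t =
      if y = t then 1 else if t ∈ ys then calculer_operations ys t + 2 else -1 := by
  have henum : PySem.List.enumerate (ys ++ [y]) 0 =
      PySem.List.enumerate ys 0 ++ [((ys.length : Int), y)] := by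
    rw [PySem.List.enumerate_append]
    simp [PySem.List.enumerate]
  by_cases hy : y = t
  · subst hy
    have hboundsP : ∀ i ∈ ((PySem.List.enumerate ys 0).filter (fun p => p.2 = y)).map
        (fun p => p.1), i < (ys.length : Int) := by
      intro i hi
      simp only [List.mem_map, List.mem_filter] at hi
      obtain ⟨p, ⟨hp, _⟩, rfl⟩ := hi
      have := mem_enumerate_bounds ys 0 p hp
      omega
    have hmem : y ∈ ys ++ [y] := by simp
    unfold calculer_operations
    rw [henum]
    simp only [hmem, not_true_eq_false, if_false, List.filter_append, List.map_append, if_true]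
    have hf : List.filter (fun p => decide (p.2 = y)) [((ys.length : Int), y)] =
        [((ys.length : Int), y)] := by simp
    rw [hf]
    simp only [List.map_cons, List.map_nil]
    rw [max?_snoc_top _ _ hboundsP]
    simp
  · have hfilt : List.filter (fun p => decide (p.2 = t)) [((ys.length : Int), y)] = [] := by
      simp only [List.filter_cons, List.filter_nil]
      simp [hy]
    by_cases ht : t ∈ ys
    · have hmem : ¬ t ∉ ys ++ [y] := by simp [ht]
      have hmem' : ¬ t ∉ ys := by simp [ht]
      have hne := filter_enumerate_ne_nil ys t ht 0
      unfold calculer_operations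
      rw [henum]
      simp only [hmem, if_false, hmem', List.filter_append, hfilt, List.append_nil]
      rcases hl : (PySem.List.enumerate ys 0).filter (fun p => p.2 = t) with _ | ⟨q, qs⟩
      · exact absurd hl hne
      · rw [hl]
        simp only [List.map_cons]
        obtain ⟨m, hm⟩ := max?_isSome q.1 (qs.map (fun p => p.1))
        rw [hm]
        simp [hy, ht]
        omega
    · have hmem2 : t ∉ ys ++ [y] := by
        intro hc
        rcases List.mem_append.mp hc with h | h
        · exact ht h
        · exact hy (List.mem_singleton.mp h).symm
      unfold calculer_operations
      rw [if_pos hmem2, if_neg hy, if_neg ht]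

-- B's accumulator shift
theorem altGo_shift (r : List Int) (t : Int) :
    ∀ k, altGo r t k = if t ∈ r then altGo r t 0 + 2 * k else -1 := by
  induction r with
  | nil => intro k; simp [altGo]
  | cons x xs ih =>
      intro k
      by_cases hx : x = t
      · simp [altGo, hx]
      · have hmem : (t ∈ x :: xs) ↔ t ∈ xs := by simp [Ne.symm hx]
        have h1 : ∀ j : Int, altGo (x :: xs) t j = altGo xs t (j + 1) := by
          intro j; simp [altGo, hx]
        rw [h1 k, h1 0, ih (k + 1), ih (0 + 1)]
        by_cases ht : t ∈ xs
        · simp [hmem, ht]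
          omega
        · simp [hmem, ht]

-- B's snoc recurrence
theorem B_snoc (ys : List Int) (y t : Int) :
    calculer_operations_alt (ys ++ [y]) t =
      if y = t then 1 else if t ∈ ys then calculer_operations_alt ys t + 2 else -1 := by
  unfold calculer_operations_alt
  rw [List.reverse_append]
  simp only [List.reverse_singleton, List.singleton_append, altGo]
  by_cases hy : y = t
  · simp [hy]
  · rw [if_neg hy, altGo_shift]
    simp only [List.mem_reverse]
    by_cases ht : t ∈ ys <;> simp [ht] <;> omega

-- ===== VERDICT (by name: the statement is the Claim_ definition above) =====
theorem AB_eq (pile : List Int) (t : Int) :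
    calculer_operations pile t = calculer_operations_alt pile t := by
  induction pile using List.reverseRecOn with
  | nil => simp [calculer_operations, calculer_operations_alt, altGo]
  | append_singleton ys y ih => rw [A_snoc, B_snoc, ih]

theorem calculer_operations_spec : Claim_equal_calculer_operations := by
  intro pile t _
  exact AB_eq pile t
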